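-- pv_equiv track=rewrite | github.com/genievy/codewars | tasks_from_codewars/codewars_057.py | string_func
-- ===== SOURCE A (Python) =====
-- def string_func(s, n):  # Быстрый рабочий код
--     iterations = [s]
--     comp = iterations[0]
--     odd = len(s) % 2
--     l = len(s) // 2
--     while True:
--         sprom = s
--         s = ''
--         if odd:
--             for i in range(l + 1):
--                 s += f'{sprom[-i-1]}{sprom[i]}'
--             s = s[:-1:]
--         else:
--             for i in range(l):
--                 s += f'{sprom[-i-1]}{sprom[i]}'
--         if s == comp:
--             break
--         iterations.append(s)
--     return iterations[n % len(iterations)]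
-- ===== SOURCE B (Python) =====
-- def string_func(s, n):
--     # Cycle-decompose the fixed position permutation of A's shuffle, reduce n
--     # modulo the lcm of the cycle lengths, and jump each position inside its
--     # cycle by index, instead of materializing iterates until they repeat.
--     m = len(s)
--
--     def sigma(j):
--         # new[j] = old[sigma(j)] for one application of A's shuffle
--         return m - 1 - j // 2 if j % 2 == 0 else j // 2
--
--     cycles = []
--     done = [False] * m
--     L = 1
--     for j in range(m):
--         if not done[j]:
--             cyc = [j]
--             t = sigma(j)
--             while t != j:
--                 cyc.append(t)
--                 t = sigma(t)
--             for x in cyc: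
--                 done[x] = True
--             c = len(cyc)
--             g, h = L, c
--             while h:
--                 g, h = h, g % h
--             L = L * c // g
--             cycles.append(cyc)
--
--     k = n % L
--     res = [''] * m
--     for cyc in cycles:
--         c = len(cyc)
--         for i in range(c):
--             res[cyc[i]] = s[cyc[(i + k) % c]]
--     return ''.join(res)
-- ===== Notes on version B (the rewrite author's own statement) =====
-- stated objective: faster
-- what changed: A repeatedly applies the shuffle to the whole string, storing every iterate until the start string reappears and then indexing by n mod that count; B instead decomposes the fixed position permutation into cycles once, reduces n modulo the lcm of the cycle lengths, and reads each output character by jumping by that offset inside its cycle.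
import Mathlib
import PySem

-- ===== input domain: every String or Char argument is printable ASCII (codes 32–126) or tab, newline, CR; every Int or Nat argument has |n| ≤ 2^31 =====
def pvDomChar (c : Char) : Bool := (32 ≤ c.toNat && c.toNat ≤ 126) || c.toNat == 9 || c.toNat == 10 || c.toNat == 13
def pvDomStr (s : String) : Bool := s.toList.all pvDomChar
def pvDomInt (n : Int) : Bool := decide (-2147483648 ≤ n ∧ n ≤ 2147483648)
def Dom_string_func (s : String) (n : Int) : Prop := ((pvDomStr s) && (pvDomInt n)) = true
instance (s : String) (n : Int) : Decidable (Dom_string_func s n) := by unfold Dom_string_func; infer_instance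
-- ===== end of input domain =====

-- B is the cycle decomposition of A's fixed position permutation: it reduces n modulo the
-- lcm of the cycle lengths and jumps each position inside its cycle, instead of A's
-- materializing successive shuffles until the start string repeats (objective: faster).

-- ===== PORT A =====
-- the body of A's for-loop: s += f'{sprom[-i-1]}{sprom[i]}' over i in range(cnt)
-- (characters are ported as List Char; an out-of-range index would contribute nothing,
-- but every index taken is in range for the lengths A uses)
def sfBuild (sprom : List Char) (cnt : Nat) : List Char :=
  (List.range cnt).foldl (fun (s : List Char) (i : Nat) =>
    s ++ (PySem.List.pyGet? sprom (-(i : Int) - 1)).toList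
      ++ (PySem.List.pyGet? sprom (i : Int)).toList) []

-- one execution of A's while-body: the if odd / else branches, s[:-1:] on the odd branch
def sfStep (sprom : List Char) : List Char :=
  let odd := sprom.length % 2
  let l := sprom.length / 2
  if odd ≠ 0 then
    PySem.List.slice (sfBuild sprom (l + 1)) none (some (-1))
  else
    sfBuild sprom l

-- A's while True loop: append shuffles until the next one equals comp.
-- fuel only bounds the recursion; the break is reached first (proved below).
def sfLoop (comp : List Char) : Nat → List Char → List (List Char) → List (List Char)
  | 0, _, iters => iters
  | fuel + 1, s, iters =>
    let s' := sfStep s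
    if s' = comp then iters else sfLoop comp fuel s' (iters ++ [s'])

def string_func (s : String) (n : Int) : String :=
  let s0 := s.toList
  let iters := sfLoop s0 (Nat.factorial s0.length + 1) s0 [s0]
  -- return iterations[n % len(iterations)]
  String.ofList ((PySem.List.pyGet? iters (PySem.Int.mod n (iters.length : Int))).getD [])

-- ===== PORT B =====
-- all arithmetic in B is on nonnegative ints with nonnegative results, so Nat / % match Python
def sigmaB (m j : Nat) : Nat := if j % 2 = 0 then m - 1 - j / 2 else j / 2

-- cyc = [j]; t = sigma(j); while t != j: cyc.append(t); t = sigma(t)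
-- fuel only bounds the while loop; t returns to j within m steps (proved below)
def walkAux (m j : Nat) : Nat → Nat → List Nat → List Nat
  | 0, _, cyc => cyc
  | fuel + 1, t, cyc => if t = j then cyc else walkAux m j fuel (sigmaB m t) (cyc ++ [t])

def walk (m j : Nat) : List Nat := walkAux m j m (sigmaB m j) [j]

-- g, h = L, c; while h: g, h = h, g % h
def gcdW (g h : Nat) : Nat :=
  if h = 0 then g else gcdW h (g % h)
termination_by h
decreasing_by exact Nat.mod_lt g (by omega)

-- the body of B's first for-loop over start positions; state = (cycles, done, L)
def bStart (m : Nat) (st : List (List Nat) × List Bool × Nat) (j : Nat) :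
    List (List Nat) × List Bool × Nat :=
  if st.2.1.getD j false then st
  else
    let cyc := walk m j
    let done := cyc.foldl (fun d x => d.set x true) st.2.1
    let c := cyc.length
    (st.1 ++ [cyc], done, st.2.2 * c / gcdW st.2.2 c)

-- the body of B's second for-loop: res[cyc[i]] = s[cyc[(i + k) % c]]
def bFill (cs : List Char) (k : Nat) (res : List (List Char)) (cyc : List Nat) :
    List (List Char) :=
  (List.range cyc.length).foldl (fun r i =>
    r.set (cyc.getD i 0) [cs.getD (cyc.getD ((i + k) % cyc.length) 0) ' ']) res

def string_func_alt (s : String) (n : Int) : String :=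
  let cs := s.toList
  let m := cs.length
  let st := (List.range m).foldl (bStart m) ([], List.replicate m false, 1)
  -- k = n % L is nonnegative (L ≥ 1), so .toNat is exact
  let k := (PySem.Int.mod n (st.2.2 : Int)).toNat
  let res := st.1.foldl (bFill cs k) (List.replicate m ([] : List Char))
  String.ofList res.flatten

-- ===== PRECONDITION & SPEC =====
def Spec_string_func (s : String) (n : Int) (out : String) : Prop := out = string_func_alt s n
instance (s : String) (n : Int) (out : String) : Decidable (Spec_string_func s n out) := by unfold Spec_string_func; infer_instance

-- ===== CLAIM (what is proved, stated in full; the proofs are below) =====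
def Claim_equal_string_func : Prop := ∀ (s : String) (n : Int), Dom_string_func s n → Spec_string_func s n (string_func s n)

-- ===== LEMMAS AND PROOFS =====

-- ----- the permutation sigma and its iterates -----

theorem sigma_lt {m j : Nat} (hj : j < m) : sigmaB m j < m := by
  unfold sigmaB; split <;> omega

theorem sigma_inj {m a b : Nat} (ha : a < m) (hb : b < m)
    (h : sigmaB m a = sigmaB m b) : a = b := by
  unfold sigmaB at h; split_ifs at h <;> omega

theorem iter_lt {m j : Nat} (r : Nat) (hj : j < m) : (sigmaB m)^[r] j < m := by
  induction r generalizing j with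
  | zero => simpa using hj
  | succ r ih => rw [Function.iterate_succ_apply]; exact ih (sigma_lt hj)

theorem iter_inj {m a b : Nat} (r : Nat) (ha : a < m) (hb : b < m)
    (h : (sigmaB m)^[r] a = (sigmaB m)^[r] b) : a = b := by
  induction r generalizing a b with
  | zero => simpa using h
  | succ r ih =>
    rw [Function.iterate_succ_apply, Function.iterate_succ_apply] at h
    exact sigma_inj ha hb (ih (sigma_lt ha) (sigma_lt hb) h)

-- generic point-period lemmas for iterates
theorem per_mul {α : Type} {f : α → α} {x : α} {c : Nat} (h : f^[c] x = x) (q : Nat) :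
    f^[q * c] x = x := by
  induction q with
  | zero => simp
  | succ q ih => rw [Nat.succ_mul, Function.iterate_add_apply, h, ih]

theorem per_mod {α : Type} {f : α → α} {x : α} {c : Nat} (h : f^[c] x = x) (k : Nat) :
    f^[k] x = f^[k % c] x := by
  conv_lhs => rw [(Nat.mod_add_div k c).symm]
  rw [Function.iterate_add_apply, Nat.mul_comm, per_mul h]

theorem per_dvd {α : Type} {f : α → α} {x : α} {c N : Nat} (h : f^[c] x = x)
    (hd : c ∣ N) : f^[N] x = x := by
  obtain ⟨q, rfl⟩ := hd
  rw [Nat.mul_comm]; exact per_mul h q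

-- every position returns to itself within m steps (pigeonhole on the m+1 iterates)
theorem ex_period {m j : Nat} (hj : j < m) :
    ∃ c, 0 < c ∧ c ≤ m ∧ (sigmaB m)^[c] j = j := by
  have hmaps : ∀ i ∈ Finset.range (m + 1), (sigmaB m)^[i] j ∈ Finset.range m := by
    intro i _; exact Finset.mem_range.mpr (iter_lt i hj)
  obtain ⟨a, ha, b, hb, hne, heq⟩ :=
    Finset.exists_ne_map_eq_of_card_lt_of_maps_to
      (by simp) hmaps
  rcases Nat.lt_or_ge a b with hab | hab
  · refine ⟨b - a, by omega, by simp at hb; omega, ?_⟩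
    have : (sigmaB m)^[a] ((sigmaB m)^[b - a] j) = (sigmaB m)^[a] j := by
      rw [← Function.iterate_add_apply, show a + (b - a) = b by omega, heq]
    exact iter_inj a (iter_lt _ hj) hj this
  · have hba : b < a := by omega
    refine ⟨a - b, by omega, by simp at ha; omega, ?_⟩
    have : (sigmaB m)^[b] ((sigmaB m)^[a - b] j) = (sigmaB m)^[b] j := by
      rw [← Function.iterate_add_apply, show b + (a - b) = a by omega, ← heq]
    exact iter_inj b (iter_lt _ hj) hj this

-- ----- the walk builds exactly one cycle -----

theorem walkAux_eq {m j c : Nat} (hc : (sigmaB m)^[c] j = j)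
    (hmin : ∀ i, 0 < i → i < c → (sigmaB m)^[i] j ≠ j) :
    ∀ fuel a, 1 ≤ a → a ≤ c → c ≤ a + fuel →
      walkAux m j fuel ((sigmaB m)^[a] j) ((List.range a).map (fun i => (sigmaB m)^[i] j)) =
        (List.range c).map (fun i => (sigmaB m)^[i] j) := by
  intro fuel
  induction fuel with
  | zero =>
    intro a h1 h2 h3
    have : a = c := by omega
    subst this; rfl
  | succ fuel ih =>
    intro a h1 h2 h3
    rw [walkAux]
    by_cases ht : (sigmaB m)^[a] j = j
    · have : a = c := by
        rcases Nat.lt_or_ge a c with h | h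
        · exact absurd ht (hmin a h1 h)
        · omega
      subst this; simp [ht]
    · have hac : a < c := by
        rcases Nat.eq_or_lt_of_le h2 with h | h
        · subst h; exact absurd hc ht
        · exact h
      simp only [ht, if_false]
      have hstep : sigmaB m ((sigmaB m)^[a] j) = (sigmaB m)^[a + 1] j := by
        rw [Function.iterate_succ_apply']
      have hcyc : (List.range a).map (fun i => (sigmaB m)^[i] j) ++ [(sigmaB m)^[a] j] =
          (List.range (a + 1)).map (fun i => (sigmaB m)^[i] j) := by
        rw [List.range_succ, List.map_append]; rfl
      rw [hstep, hcyc]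
      exact ih (a + 1) (by omega) hac (by omega)

theorem walk_spec {m j : Nat} (hj : j < m) :
    ∃ c, 0 < c ∧ c ≤ m ∧ (sigmaB m)^[c] j = j ∧
      (∀ i, 0 < i → i < c → (sigmaB m)^[i] j ≠ j) ∧
      walk m j = (List.range c).map (fun i => (sigmaB m)^[i] j) := by
  obtain ⟨c1, hc1, hc1m, hc1p⟩ := ex_period hj
  have hex : ∃ c, 0 < c ∧ (sigmaB m)^[c] j = j := ⟨c1, hc1, hc1p⟩
  classical
  let c0 := Nat.find hex
  have hc0 : 0 < c0 ∧ (sigmaB m)^[c0] j = j := Nat.find_spec hex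
  have hc0m : c0 ≤ m := le_trans (Nat.find_min' hex ⟨hc1, hc1p⟩) hc1m
  have hmin : ∀ i, 0 < i → i < c0 → (sigmaB m)^[i] j ≠ j := by
    intro i hi0 hic hcontra
    exact Nat.find_min hex hic ⟨hi0, hcontra⟩
  refine ⟨c0, hc0.1, hc0m, hc0.2, hmin, ?_⟩
  have h1 : walk m j = walkAux m j m ((sigmaB m)^[1] j)
      ((List.range 1).map (fun i => (sigmaB m)^[i] j)) := by
    simp [walk]
  rw [h1, walkAux_eq hc0.2 hmin m 1 (by omega) hc0.1 (by omega)]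

-- ----- the fold over start positions: state invariant -----

theorem gcdW_eq (g h : Nat) : gcdW g h = Nat.gcd g h := by
  fun_induction gcdW g h with
  | case1 => simp
  | case2 => rename_i g h hh ih; rw [ih, Nat.gcd_comm h (g % h), ← Nat.gcd_rec, Nat.gcd_comm]

theorem getD_set_other (d : List Bool) (x y : Nat) (hxy : x ≠ y) :
    (d.set y true).getD x false = d.getD x false := by
  simp [List.getD, Ne.symm hxy]

theorem getD_set_oob (d : List Bool) (x : Nat) (hx : ¬ x < d.length) :
    (d.set x true).getD x false = d.getD x false := by
  rw [List.set_eq_of_length_le (by omega)]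

theorem foldl_set_length (l : List Nat) (d : List Bool) :
    (l.foldl (fun d x => d.set x true) d).length = d.length := by
  induction l generalizing d with
  | nil => rfl
  | cons y l ih => simp [List.foldl_cons, ih]

theorem foldl_set_getD (l : List Nat) (d : List Bool) (x : Nat) :
    (l.foldl (fun d x => d.set x true) d).getD x false = true ↔
      (x ∈ l ∧ x < d.length) ∨ d.getD x false = true := by
  induction l generalizing d with
  | nil => simp
  | cons y l ih =>
    rw [List.foldl_cons, ih]
    by_cases hxy : x = y
    · subst hxy
      by_cases hlen : x < d.length
      · simp [List.getD, hlen]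
      · rw [getD_set_oob d x hlen]
        simp only [List.length_set]
        constructor
        · rintro (⟨_, h⟩ | h) <;> [omega; exact Or.inr h]
        · rintro (⟨_, h⟩ | h) <;> [omega; exact Or.inr h]
    · rw [getD_set_other d x y hxy]
      simp only [List.length_set, List.mem_cons]
      constructor
      · rintro (⟨h1, h2⟩ | h) <;> [exact Or.inl ⟨Or.inr h1, h2⟩; exact Or.inr h]
      · rintro (⟨h1, h2⟩ | h)
        · rcases h1 with rfl | h1 <;> [exact absurd rfl hxy; exact Or.inl ⟨h1, h2⟩]
        · exact Or.inr h

-- what a stored cycle looks like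
def GoodCyc (m L : Nat) (cyc : List Nat) : Prop :=
  ∃ j, j < m ∧ 0 < cyc.length ∧ (sigmaB m)^[cyc.length] j = j ∧
    cyc = (List.range cyc.length).map (fun i => (sigmaB m)^[i] j) ∧ cyc.length ∣ L

def StInv (m : Nat) (st : List (List Nat) × List Bool × Nat) : Prop :=
  (∀ cyc ∈ st.1, GoodCyc m st.2.2 cyc) ∧
    0 < st.2.2 ∧ st.2.2 ∣ Nat.factorial m ∧ st.2.1.length = m ∧
    (∀ x, st.2.1.getD x false = true → ∃ cyc ∈ st.1, x ∈ cyc)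

theorem mem_goodCyc_lt {m L : Nat} {cyc : List Nat} (h : GoodCyc m L cyc) :
    ∀ x ∈ cyc, x < m := by
  obtain ⟨j, hj, _, _, hform, _⟩ := h
  intro x hx
  rw [hform] at hx
  obtain ⟨i, _, rfl⟩ := List.mem_map.mp hx
  exact iter_lt i hj

theorem bStart_preserves {m : Nat} {st : List (List Nat) × List Bool × Nat} {j : Nat}
    (hinv : StInv m st) (hj : j < m) :
    StInv m (bStart m st j) ∧ (bStart m st j).2.1.getD j false = true ∧
      (∀ x, st.2.1.getD x false = true → (bStart m st j).2.1.getD x false = true) := by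
  obtain ⟨hcycs, hL, hLf, hdlen, hcov⟩ := hinv
  by_cases hdone : st.2.1.getD j false = true
  · rw [bStart, if_pos hdone]
    exact ⟨⟨hcycs, hL, hLf, hdlen, hcov⟩, hdone, fun x h => h⟩
  · rw [bStart, if_neg hdone]
    obtain ⟨c, hc0, hcm, hcper, hcmin, hwalk⟩ := walk_spec hj
    have hclen : (walk m j).length = c := by rw [hwalk]; simp
    have hLnew : st.2.2 * (walk m j).length / gcdW st.2.2 (walk m j).length =
        Nat.lcm st.2.2 (walk m j).length := by
      rw [gcdW_eq]; rfl
    have hgood : GoodCyc m (Nat.lcm st.2.2 (walk m j).length) (walk m j) := by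
      refine ⟨j, hj, by omega, by rw [hclen]; exact hcper, by rw [hclen]; exact hwalk, ?_⟩
      exact Nat.dvd_lcm_right _ _
    have hmemwalk : j ∈ walk m j := by
      rw [hwalk]
      exact List.mem_map.mpr ⟨0, List.mem_range.mpr hc0, rfl⟩
    refine ⟨⟨?_, ?_, ?_, ?_, ?_⟩, ?_, ?_⟩
    · intro cyc hcyc
      simp only [hLnew]
      rcases List.mem_append.mp hcyc with hcyc | hcyc
      · obtain ⟨j2, hj2, h1, h2, h3, h4⟩ := hcycs cyc hcyc
        exact ⟨j2, hj2, h1, h2, h3, h4.trans (Nat.dvd_lcm_left _ _)⟩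
      · simp only [List.mem_singleton] at hcyc
        subst hcyc; exact hgood
    · simp only [hLnew]
      exact Nat.lcm_pos hL (by omega)
    · simp only [hLnew]
      exact Nat.lcm_dvd hLf (Nat.dvd_factorial (by omega) (by omega))
    · simpa [foldl_set_length] using hdlen
    · intro x hx
      rcases (foldl_set_getD _ _ _).mp hx with ⟨hmem, _⟩ | hold
      · exact ⟨walk m j, List.mem_append_right _ (List.mem_singleton.mpr rfl), hmem⟩
      · obtain ⟨cyc, h1, h2⟩ := hcov x hold
        exact ⟨cyc, List.mem_append_left _ h1, h2⟩
    · exact (foldl_set_getD _ _ _).mpr (Or.inl ⟨hmemwalk, by omega⟩)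
    · intro x hx
      exact (foldl_set_getD _ _ _).mpr (Or.inr hx)

theorem bStart_fold {m : Nat} (js : List Nat) (st : List (List Nat) × List Bool × Nat)
    (hjs : ∀ j ∈ js, j < m) (hinv : StInv m st) :
    StInv m (js.foldl (bStart m) st) ∧
      (∀ x, st.2.1.getD x false = true → (js.foldl (bStart m) st).2.1.getD x false = true) ∧
      ∀ j ∈ js, (js.foldl (bStart m) st).2.1.getD j false = true := by
  induction js generalizing st with
  | nil => exact ⟨hinv, fun x h => h, by simp⟩
  | cons j js ih =>
    have hj : j < m := hjs j (List.mem_cons_self ..)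
    obtain ⟨hinv1, htrue, hmono1⟩ := bStart_preserves hinv hj
    rw [List.foldl_cons]
    obtain ⟨hinv2, hmono2, hall⟩ := ih (bStart m st j) (fun x hx => hjs x (List.mem_cons_of_mem _ hx)) hinv1
    refine ⟨hinv2, fun x hx => hmono2 x (hmono1 x hx), ?_⟩
    intro x hx
    rcases List.mem_cons.mp hx with rfl | hx
    · exact hmono2 x htrue
    · exact hall x hx

-- ----- A's shuffle step, pointwise -----

-- the permutation step, written pointwise
def stepP (cs : List Char) : List Char :=
  (List.range cs.length).map (fun j => cs.getD (sigmaB cs.length j) ' ')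

theorem map_getD_range_self (cs : List Char) :
    (List.range cs.length).map (fun j => cs.getD j ' ') = cs := by
  apply List.ext_getElem (by simp)
  intro i h1 h2
  simp [List.getD, List.getElem?_eq_getElem h2]

theorem flatMap_pair (cnt : Nat) (f g : Nat → Char) :
    (List.range cnt).flatMap (fun i => ([f i, g i] : List Char)) =
      (List.range (2 * cnt)).map
        (fun j => if j % 2 = 0 then f (j / 2) else g (j / 2)) := by
  induction cnt with
  | zero => rfl
  | succ c ih =>
    rw [List.range_succ, List.flatMap_append, ih,
      show 2 * (c + 1) = (2 * c + 1) + 1 by omega, List.range_succ, List.range_succ,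
      List.map_append, List.map_append]
    have h1 : (2 * c) % 2 = 0 := by omega
    have h2 : (2 * c) / 2 = c := by omega
    have h3 : (2 * c + 1) % 2 = 1 := by omega
    have h4 : (2 * c + 1) / 2 = c := by omega
    simp [h1, h2, h3, h4]

theorem sfBuild_eq (cs : List Char) (cnt : Nat) (h : cnt ≤ cs.length) :
    sfBuild cs cnt = (List.range (2 * cnt)).map
      (fun j => cs.getD (if j % 2 = 0 then cs.length - 1 - j / 2 else j / 2) ' ') := by
  unfold sfBuild
  simp only [List.append_assoc]
  rw [PySem.List.foldl_append_eq_flatMap, List.nil_append]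
  have hcong : ∀ i ∈ List.range cnt,
      (PySem.List.pyGet? cs (-(i : Int) - 1)).toList ++ (PySem.List.pyGet? cs (i : Int)).toList =
        ([cs.getD (cs.length - 1 - i) ' ', cs.getD i ' '] : List Char) := by
    intro i hi
    have hi' : i < cs.length := lt_of_lt_of_le (List.mem_range.mp hi) h
    have hneg : (-(i : Int) - 1) = -((i + 1 : Nat) : Int) := by push_cast; ring
    rw [hneg, PySem.List.pyGet?_neg_natCast cs (i + 1) (by omega) (by omega), PySem.List.pyGet?_natCast]
    have e1 : cs.length - (i + 1) = cs.length - 1 - i := by omega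
    rw [List.getElem?_eq_getElem (by omega), List.getElem?_eq_getElem (by omega)]
    simp [e1, List.getD, List.getElem?_eq_getElem (show cs.length - 1 - i < cs.length by omega),
      List.getElem?_eq_getElem hi']
  rw [List.flatMap_congr hcong, flatMap_pair]
  apply List.map_congr_left
  intro j _
  split <;> rfl

theorem sfStep_eq (cs : List Char) : sfStep cs = stepP cs := by
  unfold sfStep stepP
  by_cases hodd : cs.length % 2 = 0
  · simp only [hodd]
    rw [if_neg (by omega), sfBuild_eq cs (cs.length / 2) (by omega),
      show 2 * (cs.length / 2) = cs.length by omega]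
    apply List.map_congr_left
    intro j _
    unfold sigmaB
    split <;> rfl
  · rw [if_pos (by omega), sfBuild_eq cs (cs.length / 2 + 1) (by omega)]
    rw [PySem.List.slice_to_neg_one,
      show 2 * (cs.length / 2 + 1) = (2 * (cs.length / 2) + 1) + 1 by omega,
      List.range_succ, List.map_append]
    simp only [List.map_cons, List.map_nil]
    rw [List.dropLast_concat, show 2 * (cs.length / 2) + 1 = cs.length by omega]
    apply List.map_congr_left
    intro j _
    unfold sigmaB
    split <;> rfl

theorem stepP_iter (cs : List Char) (k : Nat) :
    stepP^[k] cs = (List.range cs.length).map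
      (fun j => cs.getD ((sigmaB cs.length)^[k] j) ' ') := by
  induction k with
  | zero => simpa using (map_getD_range_self cs).symm
  | succ k ih =>
    rw [Function.iterate_succ_apply', ih]
    unfold stepP
    simp only [List.length_map, List.length_range]
    apply List.map_congr_left
    intro j hj
    have hj' : j < cs.length := List.mem_range.mp hj
    rw [PySem.List.getD_map_range _ _ _ _ (sigma_lt hj'), ← Function.iterate_succ_apply]

-- ----- A's while loop returns the first period's worth of iterates -----

theorem sfLoop_eq (cs : List Char) (p : Nat)
    (hper : stepP^[p] cs = cs) (hmin : ∀ i, 0 < i → i < p → stepP^[i] cs ≠ cs) :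
    ∀ fuel t, t + 1 ≤ p → p ≤ t + 1 + fuel →
      sfLoop cs fuel (stepP^[t] cs) ((List.range (t + 1)).map (fun i => stepP^[i] cs)) =
        (List.range p).map (fun i => stepP^[i] cs) := by
  intro fuel
  induction fuel with
  | zero =>
    intro t h1 h2
    have : t + 1 = p := by omega
    rw [sfLoop, this]
  | succ fuel ih =>
    intro t h1 h2
    rw [sfLoop]
    have hstep : sfStep (stepP^[t] cs) = stepP^[t + 1] cs := by
      rw [sfStep_eq]
      exact (Function.iterate_succ_apply' stepP t cs).symm
    rcases Nat.eq_or_lt_of_le h1 with heq | hlt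
    · rw [if_pos (by rw [hstep, heq, hper]), heq]
    · rw [if_neg (by rw [hstep]; exact hmin (t + 1) (by omega) hlt)]
      have : (List.range (t + 1)).map (fun i => stepP^[i] cs) ++ [sfStep (stepP^[t] cs)] =
          (List.range (t + 2)).map (fun i => stepP^[i] cs) := by
        rw [hstep]
        simp [List.range_succ]
      rw [this, hstep]
      exact ih (t + 1) hlt (by omega)

-- ----- B's fill pass writes s[sigma^k(x)] into every slot of every cycle -----

theorem getD_set_self' {α : Type} (d : List α) (x : Nat) (v dflt : α) (hx : x < d.length) :
    (d.set x v).getD x dflt = v := by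
  simp [List.getD, hx]

theorem getD_set_other' {α : Type} (d : List α) (x y : Nat) (v dflt : α) (hxy : x ≠ y) :
    (d.set y v).getD x dflt = d.getD x dflt := by
  simp [List.getD, Ne.symm hxy]

theorem bFill_spec (cs : List Char) (k m L : Nat) (cyc : List Nat) (hg : GoodCyc m L cyc)
    (res : List (List Char)) (hlen : res.length = m) :
    (bFill cs k res cyc).length = m ∧
      (∀ x, x ∉ cyc → (bFill cs k res cyc).getD x [] = res.getD x []) ∧
      (∀ x ∈ cyc, (bFill cs k res cyc).getD x [] =
        [cs.getD ((sigmaB m)^[k] x) ' ']) := by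
  obtain ⟨j, hj, hc0, hcper, hform, -⟩ := hg
  set c := cyc.length with hc
  -- the value written at step i is the target of the slot cyc[i]
  have hgetD : ∀ i, i < c → cyc.getD i 0 = (sigmaB m)^[i] j := by
    intro i hi
    rw [hform]
    exact PySem.List.getD_map_range _ _ _ _ (by simpa [hform] using hi)
  have hvalue : ∀ i, i < c →
      cyc.getD ((i + k) % c) 0 = (sigmaB m)^[k] (cyc.getD i 0) := by
    intro i hi
    rw [hgetD _ (Nat.mod_lt _ hc0), hgetD _ hi, ← Function.iterate_add_apply,
      Nat.add_comm i k]
    exact (per_mod hcper (k + i)).symm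
  have hmem : ∀ i, i < c → cyc.getD i 0 ∈ cyc := by
    intro i hi
    rw [List.getD_eq_getElem cyc 0 hi]
    exact List.getElem_mem hi
  -- reverse induction over the prefix of writes
  have main : ∀ c' ≤ c,
      ((List.range c').foldl (fun r i =>
          r.set (cyc.getD i 0) [cs.getD (cyc.getD ((i + k) % cyc.length) 0) ' ']) res).length = m ∧
        (∀ x, x ∉ cyc →
          ((List.range c').foldl (fun r i =>
            r.set (cyc.getD i 0) [cs.getD (cyc.getD ((i + k) % cyc.length) 0) ' ']) res).getD x [] =
            res.getD x []) ∧
        (∀ i < c',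
          ((List.range c').foldl (fun r i =>
            r.set (cyc.getD i 0) [cs.getD (cyc.getD ((i + k) % cyc.length) 0) ' ']) res).getD
              (cyc.getD i 0) [] = [cs.getD ((sigmaB m)^[k] (cyc.getD i 0)) ' ']) := by
    intro c'
    induction c' with
    | zero => exact fun _ => ⟨hlen, fun x _ => rfl, fun i hi => absurd hi (by omega)⟩
    | succ c' ih =>
      intro hc'
      obtain ⟨ihlen, ihout, ihin⟩ := ih (by omega)
      rw [List.range_succ, List.foldl_append, List.foldl_cons, List.foldl_nil]
      set r' := (List.range c').foldl (fun r i =>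
        r.set (cyc.getD i 0) [cs.getD (cyc.getD ((i + k) % cyc.length) 0) ' ']) res with hr'
      have hidx : cyc.getD c' 0 < m :=
        mem_goodCyc_lt ⟨j, hj, hc0, hcper, hform, Nat.dvd_refl _⟩ _ (hmem c' (by omega))
      have hval' : cyc.getD ((c' + k) % cyc.length) 0 = (sigmaB m)^[k] (cyc.getD c' 0) :=
        hvalue c' (by omega)
      refine ⟨by simpa using ihlen, ?_, ?_⟩
      · intro x hx
        rw [getD_set_other' _ _ _ _ _
          (fun h : x = cyc.getD c' 0 => hx (by rw [h]; exact hmem c' (by omega)))]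
        exact ihout x hx
      · intro i hi
        by_cases hsame : cyc.getD i 0 = cyc.getD c' 0
        · rw [hsame, getD_set_self' _ _ _ _ (by omega), hval']
        · have hi' : i < c' := by
            rcases Nat.lt_or_ge i c' with h | h
            · exact h
            · exact absurd (by omega : i = c') (fun h2 => hsame (by rw [h2]))
          rw [getD_set_other' _ _ _ _ _ hsame]
          exact ihin i hi'
  obtain ⟨h1, h2, h3⟩ := main c (le_refl c)
  refine ⟨h1, h2, ?_⟩
  intro x hx
  -- every member of the cycle is cyc[i] for some i < c
  have : ∃ i, i < c ∧ cyc.getD i 0 = x := by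
    rw [hform] at hx
    obtain ⟨i, hi, rfl⟩ := List.mem_map.mp hx
    have hi' : i < c := by simpa [hform] using List.mem_range.mp hi
    exact ⟨i, hi', hgetD i hi'⟩
  obtain ⟨i, hi, rfl⟩ := this
  exact h3 i hi

theorem bFill_fold (cs : List Char) (k m : Nat) :
    ∀ (cycles : List (List Nat)) (res : List (List Char)),
      (∀ cyc ∈ cycles, ∃ L, GoodCyc m L cyc) → res.length = m →
      (cycles.foldl (bFill cs k) res).length = m ∧
        ∀ x, (res.getD x [] = [cs.getD ((sigmaB m)^[k] x) ' '] ∨ ∃ cyc ∈ cycles, x ∈ cyc) →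
          (cycles.foldl (bFill cs k) res).getD x [] = [cs.getD ((sigmaB m)^[k] x) ' '] := by
  intro cycles
  induction cycles with
  | nil =>
    intro res _ hlen
    refine ⟨hlen, ?_⟩
    rintro x (hx | ⟨cyc, h, _⟩)
    · exact hx
    · exact absurd h (List.not_mem_nil)
  | cons cyc cycles ih =>
    intro res hcycles hlen
    obtain ⟨L, hg⟩ := hcycles cyc (List.mem_cons_self ..)
    obtain ⟨hflen, hfout, hfin⟩ := bFill_spec cs k m L cyc hg res hlen
    rw [List.foldl_cons]
    obtain ⟨ihlen, ihcorrect⟩ := ih (bFill cs k res cyc)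
      (fun c hc => hcycles c (List.mem_cons_of_mem _ hc)) hflen
    refine ⟨ihlen, ?_⟩
    rintro x (hx | ⟨cyc', hc', hx⟩)
    · apply ihcorrect
      left
      by_cases hxc : x ∈ cyc
      · rw [hfin x hxc]
      · rw [hfout x hxc]; exact hx
    · rcases List.mem_cons.mp hc' with rfl | hc'
      · exact ihcorrect x (Or.inl (hfin x hx))
      · exact ihcorrect x (Or.inr ⟨cyc', hc', hx⟩)

-- ----- assembly -----

theorem replicate_getD_false (m x : Nat) : (List.replicate m false).getD x false = false := by
  simp [List.getD, List.getElem?_replicate]; split <;> rfl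

theorem flatten_map_singleton (l : List Nat) (f : Nat → Char) :
    (l.map (fun a => [f a])).flatten = l.map f := by
  induction l with
  | nil => rfl
  | cons a l ih => simp [ih]

theorem string_func_eq_iterate (s : String) (n : Int) :
    ∃ a : Nat, string_func s n = String.ofList (stepP^[a] s.toList) ∧
      string_func_alt s n = String.ofList (stepP^[a] s.toList) := by
  classical
  set cs := s.toList with hcs
  set m := cs.length with hm
  -- B's first pass and its invariant
  have hinv0 : StInv m ([], List.replicate m false, 1) := by
    refine ⟨by simp, by norm_num, Nat.one_dvd _, by simp, ?_⟩
    intro x hx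
    rw [replicate_getD_false] at hx
    exact absurd hx (by simp)
  obtain ⟨hinv, -, hall⟩ := bStart_fold (List.range m) _ (fun j hj => List.mem_range.mp hj) hinv0
  set st := (List.range m).foldl (bStart m) ([], List.replicate m false, 1) with hst
  obtain ⟨hgood, hL1, hLfact, -, hcovinv⟩ := hinv
  set L := st.2.2 with hLdef
  have hcov : ∀ x, x < m → ∃ cyc ∈ st.1, x ∈ cyc := by
    intro x hx
    exact hcovinv x (hall x (List.mem_range.mpr hx))
  -- the whole permutation has order dividing L
  have hsgL : ∀ x, x < m → (sigmaB m)^[L] x = x := by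
    intro x hx
    obtain ⟨cyc, hcyc, hxcyc⟩ := hcov x hx
    obtain ⟨j, hj, hc0, hcper, hform, hcdvd⟩ := hgood cyc hcyc
    have hLj : (sigmaB m)^[L] j = j := per_dvd hcper hcdvd
    rw [hform] at hxcyc
    obtain ⟨i, -, rfl⟩ := List.mem_map.mp hxcyc
    rw [← Function.iterate_add_apply, Nat.add_comm, Function.iterate_add_apply, hLj]
  have hstepL : stepP^[L] cs = cs := by
    rw [stepP_iter]
    have : ∀ j ∈ List.range cs.length,
        cs.getD ((sigmaB cs.length)^[L] j) ' ' = cs.getD j ' ' := by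
      intro j hj
      rw [hsgL j (List.mem_range.mp hj)]
    rw [List.map_congr_left this, map_getD_range_self]
  -- p = the minimal period of the string itself
  have hex : ∃ c, 0 < c ∧ stepP^[c] cs = cs := ⟨L, hL1, hstepL⟩
  set p := Nat.find hex with hpdef
  obtain ⟨hp0, hpper⟩ := Nat.find_spec hex
  have hmin : ∀ i, 0 < i → i < p → stepP^[i] cs ≠ cs := by
    intro i h0 hip hcon
    exact Nat.find_min hex hip ⟨h0, hcon⟩
  have hpL : p ≤ L := Nat.find_min' hex ⟨hL1, hstepL⟩
  have hpdvd : p ∣ L := by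
    have h1 : stepP^[L % p] cs = cs := by rw [← per_mod hpper L, hstepL]
    rcases Nat.eq_zero_or_pos (L % p) with h | h
    · exact Nat.dvd_of_mod_eq_zero h
    · exact absurd h1 (hmin _ h (Nat.mod_lt _ hp0))
  have hpfact : p ≤ Nat.factorial m :=
    le_trans hpL (Nat.le_of_dvd (Nat.factorial_pos m) hLfact)
  -- A's loop collects exactly the first p iterates
  have hiters : sfLoop cs (Nat.factorial m + 1) cs [cs] =
      (List.range p).map (fun i => stepP^[i] cs) := by
    have h0 : ([cs] : List (List Char)) = (List.range (0 + 1)).map (fun i => stepP^[i] cs) := by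
      simp
    have h1 : cs = stepP^[0] cs := rfl
    calc sfLoop cs (Nat.factorial m + 1) cs [cs]
        = sfLoop cs (Nat.factorial m + 1) (stepP^[0] cs)
            ((List.range (0 + 1)).map (fun i => stepP^[i] cs)) := by rw [← h0, ← h1]
      _ = (List.range p).map (fun i => stepP^[i] cs) :=
          sfLoop_eq cs p hpper hmin _ 0 (by omega) (by omega)
  -- A's return value
  have hlen : ((List.range p).map (fun i => stepP^[i] cs)).length = p := by simp
  have hpInt : (0 : Int) < (p : Int) := by exact_mod_cast hp0
  have hmodA : PySem.Int.mod n (p : Int) = n % (p : Int) := PySem.Int.mod_eq_emod_of_pos hpInt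
  have hA0 : 0 ≤ n % (p : Int) := Int.emod_nonneg n (by omega)
  have hAlt : n % (p : Int) < (p : Int) := Int.emod_lt_of_pos n hpInt
  have hAidx : (n % (p : Int)).toNat < p := by omega
  have hAget : PySem.List.pyGet? ((List.range p).map (fun i => stepP^[i] cs)) (n % (p : Int)) =
      some (stepP^[(n % (p : Int)).toNat] cs) := by
    rw [PySem.List.pyGet?_of_nonneg _ hA0, List.getElem?_eq_getElem (by simpa using hAidx)]
    simp
  have hA : string_func s n = String.ofList (stepP^[(n % (p : Int)).toNat] cs) := by
    show String.ofList ((PySem.List.pyGet? (sfLoop cs (Nat.factorial m + 1) cs [cs])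
      (PySem.Int.mod n ((sfLoop cs (Nat.factorial m + 1) cs [cs]).length : Int))).getD []) = _
    rw [hiters, hlen, hmodA, hAget]
    rfl
  -- B's return value
  set k := (PySem.Int.mod n (L : Int)).toNat with hk
  have hres : st.1.foldl (bFill cs k) (List.replicate m []) =
      (List.range m).map (fun x => [cs.getD ((sigmaB m)^[k] x) ' ']) := by
    obtain ⟨hflen, hfcorrect⟩ := bFill_fold cs k m st.1 (List.replicate m [])
      (fun cyc hc => ⟨L, hgood cyc hc⟩) (by simp)
    apply List.ext_getElem (by simp [hflen])
    intro i h1 h2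
    have him : i < m := by simpa [hflen] using h1
    have : (st.1.foldl (bFill cs k) (List.replicate m [])).getD i [] =
        [cs.getD ((sigmaB m)^[k] i) ' '] := by
      apply hfcorrect
      right
      exact hcov i him
    rw [← List.getD_eq_getElem _ [] h1, this]
    rw [List.getElem_map]
    congr 1
    simp
  have hB : string_func_alt s n =
      String.ofList (((List.range m).map (fun x => [cs.getD ((sigmaB m)^[k] x) ' '])).flatten) := by
    show String.ofList ((st.1.foldl (bFill cs k) (List.replicate m [])).flatten) = _
    rw [hres]
  -- both sides are iterates of the same step
  have hBiter : string_func_alt s n = String.ofList (stepP^[k] cs) := by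
    rw [hB, flatten_map_singleton, stepP_iter]
  -- and the two exponents agree modulo the minimal period p
  have hLInt : (0 : Int) < (L : Int) := by exact_mod_cast hL1
  have hkmod : k % p = (n % (p : Int)).toNat := by
    have hklift : ((k : Int)) = n % (L : Int) := by
      rw [hk, PySem.Int.mod_eq_emod_of_pos hLInt]
      exact Int.toNat_of_nonneg (Int.emod_nonneg n (by omega))
    have hcast : ((k % p : Nat) : Int) = n % (p : Int) := by
      push_cast
      rw [hklift]
      exact Int.emod_emod_of_dvd n (by exact_mod_cast hpdvd)
    omega
  have hfinal : stepP^[k] cs = stepP^[(n % (p : Int)).toNat] cs := by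
    rw [per_mod hpper k, hkmod]
  exact ⟨(n % (p : Int)).toNat, hA, by rw [hBiter, hfinal]⟩

-- ===== VERDICT (by name: the statement is the Claim_ definition above) =====
theorem string_func_spec : Claim_equal_string_func := by
  intro s n _
  unfold Spec_string_func
  obtain ⟨a, hA, hB⟩ := string_func_eq_iterate s n
  rw [hA, hB]
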